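-- pv_equiv track=rewrite | github.com/StevenXoFk/Tarea-taller-Tkinter | convertidor.py | base10_a_base7
-- ===== SOURCE A (Python) =====
-- def base10_a_base7(numero):
--     decimal = 0
--     exponente = 0
--
--     while numero > 0:
--         digitos = numero % 10
--         decimal += digitos * (10 ** exponente)
--         numero //= 10
--         exponente += 1
--
--     binario = 0
--     valor = 1
--     while decimal > 0:
--         todo = decimal % 7
--         binario += todo * valor
--         decimal //= 7
--         valor *= 10
--
--     return binario
-- ===== SOURCE B (Python) =====
-- def base10_a_base7(numero):
--     digits = []
--     while numero > 0:
--         digits.append(numero % 7)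
--         numero //= 7
--     resultado = 0
--     for d in reversed(digits):
--         resultado = resultado * 10 + d
--     return resultado
-- ===== Notes on version B (the rewrite author's own statement) =====
-- stated objective: simpler
-- what changed: Replaced A's two accumulator loops (a redundant digit-rebuilding pass plus a least-significant-first base-7 pass with a growing power-of-ten multiplier) by collecting the base-7 remainders into a list and folding over it in reverse to assemble the decimal-looking result.
import Mathlib
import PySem

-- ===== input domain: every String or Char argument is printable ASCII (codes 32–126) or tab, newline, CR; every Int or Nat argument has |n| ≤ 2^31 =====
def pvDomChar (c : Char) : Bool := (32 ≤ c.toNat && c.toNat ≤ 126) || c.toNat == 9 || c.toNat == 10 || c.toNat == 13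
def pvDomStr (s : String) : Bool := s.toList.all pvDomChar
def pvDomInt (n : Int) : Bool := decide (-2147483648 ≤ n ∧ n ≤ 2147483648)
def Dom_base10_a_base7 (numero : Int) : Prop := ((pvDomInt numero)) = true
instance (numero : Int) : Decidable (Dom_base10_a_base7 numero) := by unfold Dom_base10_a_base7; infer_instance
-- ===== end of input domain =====

-- B replaces A's two accumulator loops by collecting the base-7 remainder digits into a list
-- and folding over that list in reverse; objective: simpler.

-- termination helper for the loops: floor division by a base > 1 shrinks a positive Int's toNat
theorem pvDivShrink (n b : Int) (hn : 0 < n) (hb : 1 < b) :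
    (PySem.Int.floordiv n b).toNat < n.toNat := by
  rw [PySem.Int.floordiv_eq_ediv_of_pos (by omega)]
  have h0 : b * (n / b) + n % b = n := Int.mul_ediv_add_emod n b
  have h2 : 0 ≤ n / b := Int.ediv_nonneg (by omega) (by omega)
  have h3 : 0 ≤ n % b := Int.emod_nonneg n (by omega)
  have h1 : n / b < n := by nlinarith
  omega

-- ===== PORT A =====
-- first while loop: rebuilds the decimal digits of numero into `decimal`
def pvALoop1 (numero decimal exponente : Int) : Int :=
  if h : numero > 0 then
    pvALoop1 (PySem.Int.floordiv numero 10)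
      (decimal + (PySem.Int.mod numero 10) * 10 ^ exponente.toNat)
      (exponente + 1)
  else decimal
termination_by numero.toNat
decreasing_by exact pvDivShrink numero 10 h (by norm_num)

-- second while loop: extracts base-7 digits least-significant-first with a growing multiplier
def pvALoop2 (decimal valor binario : Int) : Int :=
  if h : decimal > 0 then
    pvALoop2 (PySem.Int.floordiv decimal 7) (valor * 10)
      (binario + (PySem.Int.mod decimal 7) * valor)
  else binario
termination_by decimal.toNat
decreasing_by exact pvDivShrink decimal 7 h (by norm_num)

def base10_a_base7 (numero : Int) : Int :=
  pvALoop2 (pvALoop1 numero 0 0) 1 0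

-- ===== PORT B =====
-- the while loop of Source B: digits.append(numero % 7); numero //= 7
def pvBDigits (numero : Int) (digits : List Int) : List Int :=
  if h : numero > 0 then
    pvBDigits (PySem.Int.floordiv numero 7) (digits ++ [PySem.Int.mod numero 7])
  else digits
termination_by numero.toNat
decreasing_by exact pvDivShrink numero 7 h (by norm_num)

-- the for loop of Source B: resultado = resultado * 10 + d over reversed(digits)
def base10_a_base7_alt (numero : Int) : Int :=
  (pvBDigits numero []).reverse.foldl (fun resultado d => resultado * 10 + d) 0

-- ===== PRECONDITION & SPEC =====
def Spec_base10_a_base7 (numero : Int) (out : Int) : Prop := out = base10_a_base7_alt numero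
instance (numero : Int) (out : Int) : Decidable (Spec_base10_a_base7 numero out) := by unfold Spec_base10_a_base7; infer_instance

-- ===== CLAIM (what is proved, stated in full; the proofs are below) =====
def Claim_equal_base10_a_base7 : Prop := ∀ (numero : Int), Dom_base10_a_base7 numero → Spec_base10_a_base7 numero (base10_a_base7 numero)

-- ===== LEMMAS AND PROOFS =====

-- the digit accumulator only grows on the right
theorem pvBDigits_append (numero : Int) (digits : List Int) :
    pvBDigits numero digits = digits ++ pvBDigits numero [] := by
  by_cases h : numero > 0
  · rw [pvBDigits, dif_pos h]
    conv_rhs => rw [pvBDigits, dif_pos h]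
    simp only [List.nil_append]
    rw [pvBDigits_append (PySem.Int.floordiv numero 7) (digits ++ [PySem.Int.mod numero 7]),
        pvBDigits_append (PySem.Int.floordiv numero 7) ([PySem.Int.mod numero 7])]
    simp
  · rw [pvBDigits, dif_neg h, pvBDigits, dif_neg h]; simp
termination_by numero.toNat
decreasing_by all_goals exact pvDivShrink numero 7 h (by norm_num)

-- B's unfolding rule: alt n = alt (n // 7) * 10 + n % 7 for positive n
theorem pvAlt_pos (n : Int) (h : n > 0) :
    base10_a_base7_alt n
      = base10_a_base7_alt (PySem.Int.floordiv n 7) * 10 + PySem.Int.mod n 7 := by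
  unfold base10_a_base7_alt
  rw [show pvBDigits n [] = [PySem.Int.mod n 7] ++ pvBDigits (PySem.Int.floordiv n 7) [] from by
    rw [pvBDigits, dif_pos h, List.nil_append, pvBDigits_append]]
  simp

theorem pvAlt_nonpos (n : Int) (h : ¬ n > 0) : base10_a_base7_alt n = 0 := by
  unfold base10_a_base7_alt
  rw [pvBDigits, dif_neg h]
  simp

-- A's first loop merely reconstructs its nonnegative argument (shifted into the accumulator)
theorem pvALoop1_eq (numero decimal exponente : Int) (hn : 0 ≤ numero) (he : 0 ≤ exponente) :
    pvALoop1 numero decimal exponente = decimal + numero * 10 ^ exponente.toNat := by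
  fun_induction pvALoop1 numero decimal exponente with
  | case1 n d e h ih =>
      have hdm := PySem.Int.floordiv_mul_add_mod n 10
      have hdiv : 0 ≤ PySem.Int.floordiv n 10 := by
        rw [PySem.Int.floordiv_eq_ediv_of_pos (by omega)]
        exact Int.ediv_nonneg (by omega) (by omega)
      rw [ih hdiv (by omega)]
      have het : (e + 1).toNat = e.toNat + 1 := by omega
      rw [het, pow_succ]
      linear_combination (10:ℤ) ^ e.toNat * hdm
  | case2 n d e h => simp; omega

-- A's second loop computes binario + valor * (B's value on decimal)
theorem pvALoop2_eq (decimal valor binario : Int) (hd : 0 ≤ decimal) :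
    pvALoop2 decimal valor binario = binario + valor * base10_a_base7_alt decimal := by
  fun_induction pvALoop2 decimal valor binario with
  | case1 dec v b h ih =>
      have hdiv : 0 ≤ PySem.Int.floordiv dec 7 := by
        rw [PySem.Int.floordiv_eq_ediv_of_pos (by omega)]
        exact Int.ediv_nonneg (by omega) (by omega)
      rw [ih hdiv, pvAlt_pos dec h]
      ring
  | case2 dec v b h =>
      rw [pvAlt_nonpos dec h]; ring

-- ===== VERDICT (by name: the statement is the Claim_ definition above) =====
theorem base10_a_base7_spec : Claim_equal_base10_a_base7 := by
  intro numero _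
  unfold Spec_base10_a_base7 base10_a_base7
  by_cases hn : 0 < numero
  · rw [pvALoop1_eq numero 0 0 (by omega) le_rfl]
    simp only [Int.toNat_zero, pow_zero, mul_one, zero_add]
    rw [pvALoop2_eq numero 1 0 (by omega)]
    ring
  · rw [pvALoop1]
    simp only [hn, dite_false]
    rw [pvALoop2]
    simp only [show ¬ (0:Int) > 0 by omega, dite_false]
    rw [pvAlt_nonpos numero (by omega)]
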